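-- pv_equiv track=rewrite | github.com/mehiskasonen/iti0102-2022 | EXAM/exam1/exam.py | pairwise_min
-- ===== SOURCE A (Python) =====
-- def pairwise_min(numbers: list[int]) -> list[int]:
--     """
--     Return a list where for every element pair in the input list the minimum of those is used.
--
--     If there are odd number of elements, ignore the last lonely element.
--
--     pairwise_min([1, 2, 3, 4]) => [1, 3]
--     pairwise_min([]) => []
--     pairwise_min([1, 9, 2]) => [1]
--     pairwise_min([9, 9, 2, 2]) => [9, 2]
--     """
--     return_list = []
--     compare = []
--     for nr in numbers:
--         compare.append(nr)
--         if len(compare) == 2: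
--             return_list.append(min(compare))
--             compare = []
--     return return_list
-- ===== SOURCE B (Python) =====
-- def pairwise_min(numbers: list[int]) -> list[int]:
--     return [min(a, b) for a, b in zip(numbers[::2], numbers[1::2])]
-- ===== Notes on version B (the rewrite author's own statement) =====
-- stated objective: idiomatic
-- what changed: Replaces A's flush-on-count accumulator buffer with zipping the two stride-2 slices of the list and taking min of each aligned pair; zip drops the odd trailing element.
import Mathlib
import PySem

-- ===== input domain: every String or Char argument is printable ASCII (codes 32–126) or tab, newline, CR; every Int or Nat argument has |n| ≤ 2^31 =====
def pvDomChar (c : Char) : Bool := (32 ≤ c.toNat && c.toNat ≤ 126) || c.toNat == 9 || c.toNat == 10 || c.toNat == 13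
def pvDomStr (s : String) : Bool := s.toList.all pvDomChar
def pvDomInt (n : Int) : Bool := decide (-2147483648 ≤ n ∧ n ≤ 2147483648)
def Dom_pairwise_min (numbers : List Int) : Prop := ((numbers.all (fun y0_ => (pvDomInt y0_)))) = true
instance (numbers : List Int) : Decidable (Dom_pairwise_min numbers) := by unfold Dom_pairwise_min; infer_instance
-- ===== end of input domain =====

-- B replaces A's flush-on-count buffer with zipping the two stride-2 slices (idiomatic, same cost).

-- ===== PORT A =====
-- loop body of A (state = (return_list, compare)); literal port of A's loop
def pvStepA (st : List Int × List Int) (nr : Int) : List Int × List Int :=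
  let compare := st.2 ++ [nr]
  if compare.length == 2 then
    (st.1 ++ [(PySem.List.min? compare (fun x => x)).getD 0], [])
  else
    (st.1, compare)

def pairwise_min (numbers : List Int) : List Int :=
  (numbers.foldl pvStepA ([], [])).1

-- ===== PORT B =====
-- stride-2 slice xs[::2] (PySem.List.slice has no step parameter; exact for step 2 starting at 0)
def pvStride2 : List Int → List Int
  | [] => []
  | [a] => [a]
  | a :: _ :: rest => a :: pvStride2 rest

-- zip(numbers[::2], numbers[1::2]) with min of each pair; numbers[1::2] = (numbers.drop 1)[::2]
def pairwise_min_alt (numbers : List Int) : List Int :=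
  List.zipWith min (pvStride2 numbers) (pvStride2 (numbers.drop 1))

-- ===== PRECONDITION & SPEC =====
def Spec_pairwise_min (numbers : List Int) (out : List Int) : Prop := out = pairwise_min_alt numbers
instance (numbers : List Int) (out : List Int) : Decidable (Spec_pairwise_min numbers out) := by unfold Spec_pairwise_min; infer_instance

-- ===== CLAIM (what is proved, stated in full; the proofs are below) =====
def Claim_equal_pairwise_min : Prop := ∀ (numbers : List Int), Dom_pairwise_min numbers → Spec_pairwise_min numbers (pairwise_min numbers)

-- ===== LEMMAS AND PROOFS =====
theorem pvStride2_cons (x : Int) (xs : List Int) :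
    pvStride2 (x :: xs) = x :: pvStride2 xs.tail := by
  cases xs <;> simp [pvStride2]

theorem pairwise_min_loop (numbers acc : List Int) :
    (numbers.foldl pvStepA (acc, [])).1 = acc ++ pairwise_min_alt numbers := by
  match numbers with
  | [] => simp [pairwise_min_alt, pvStride2]
  | [a] => simp [pvStepA, pairwise_min_alt, pvStride2]
  | a :: b :: rest =>
      have h1 : pvStepA (acc, []) a = (acc, [a]) := by simp [pvStepA]
      have h2 : pvStepA (acc, [a]) b = (acc ++ [min a b], []) := by
        simp [pvStepA, PySem.List.min?_id_cons]
      rw [List.foldl_cons, List.foldl_cons, h1, h2, pairwise_min_loop rest (acc ++ [min a b])]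
      simp [pairwise_min_alt, pvStride2, pvStride2_cons]

-- ===== VERDICT (by name: the statement is the Claim_ definition above) =====
theorem pairwise_min_spec : Claim_equal_pairwise_min := by
  intro numbers _
  show pairwise_min numbers = pairwise_min_alt numbers
  simpa [pairwise_min] using pairwise_min_loop numbers []
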